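-- pv_equiv track=rewrite | github.com/sashaperigo/gedcom-tools | serve_viz.py | _citation_already_exists
-- ===== SOURCE A (Python) =====
-- def _citation_already_exists(lines: list[str], insert_pos: int, sour_xref: str, page: str, cite_level: int) -> bool:
--     """
--     Return True if sour_xref+page already appears as a citation in the block
--     that ends at insert_pos.  Scans backward until a level-0 record boundary.
--     """
--     sour_prefix = f'{cite_level} SOUR {sour_xref}'
--     page_line   = f'{cite_level + 1} PAGE {page.strip()}' if (page and page.strip()) else None
--     i = insert_pos - 1
--     while i >= 0:
--         raw = lines[i].rstrip()
--         if raw.startswith('0 '):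
--             break
--         if raw == sour_prefix or raw.startswith(sour_prefix + ' '):
--             # Matching source found — now check whether the page also matches.
--             next_line = lines[i + 1].rstrip() if (i + 1 < insert_pos) else ''
--             has_page = next_line.startswith(f'{cite_level + 1} PAGE ')
--             if page_line is None and not has_page:
--                 return True   # both have no page → exact duplicate
--             if page_line is not None and next_line == page_line:
--                 return True   # same source and same page → exact duplicate
--         i -= 1
--     return False
-- ===== SOURCE B (Python) =====
-- def _citation_already_exists(lines: list[str], insert_pos: int, sour_xref: str, page: str, cite_level: int) -> bool:
--     """List pipeline: rstrip the prefix, cut it at the last level-0 boundary,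
--     zip each remaining line with its successor, and search the pairs."""
--     sour_prefix = f'{cite_level} SOUR {sour_xref}'
--     p = page.strip() if page else ''
--     page_line = f'{cite_level + 1} PAGE {p}' if p else None
--     page_tag = f'{cite_level + 1} PAGE '
--     n = max(insert_pos, 0)
--     block = [ln.rstrip() for ln in lines[:n]]
--     cut = 0
--     for j, ln in enumerate(block):
--         if ln.startswith('0 '):
--             cut = j + 1
--     block = block[cut:]
--     pairs = zip(block, block[1:] + [''])
--     return any(
--         (raw == sour_prefix or raw.startswith(sour_prefix + ' '))
--         and (nxt == page_line if page_line is not None else not nxt.startswith(page_tag))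
--         for raw, nxt in pairs
--     )
-- ===== Notes on version B (the rewrite author's own statement) =====
-- stated objective: alternative
-- what changed: A's single interleaved backward index walk (break on the level-0 boundary, peek at lines[i+1] on the way down) is replaced by a forward list pipeline: rstrip the whole prefix once, cut it at the last level-0 boundary found by an enumerate pass, zip each remaining line with its successor, and search the pairs with any().
import Mathlib
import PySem

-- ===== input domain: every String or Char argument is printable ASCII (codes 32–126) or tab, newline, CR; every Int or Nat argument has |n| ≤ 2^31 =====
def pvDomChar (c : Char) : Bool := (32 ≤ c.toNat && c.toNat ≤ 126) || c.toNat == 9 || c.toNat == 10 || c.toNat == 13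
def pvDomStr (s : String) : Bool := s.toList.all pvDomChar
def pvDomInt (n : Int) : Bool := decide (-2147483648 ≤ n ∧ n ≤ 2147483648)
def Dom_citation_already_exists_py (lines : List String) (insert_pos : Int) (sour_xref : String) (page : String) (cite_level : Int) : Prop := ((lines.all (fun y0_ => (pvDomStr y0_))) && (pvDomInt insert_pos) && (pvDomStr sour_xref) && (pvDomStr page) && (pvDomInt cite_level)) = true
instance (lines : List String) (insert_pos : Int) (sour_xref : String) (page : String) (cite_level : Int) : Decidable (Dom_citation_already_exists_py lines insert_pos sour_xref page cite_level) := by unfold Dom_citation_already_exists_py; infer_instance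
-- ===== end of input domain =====

-- B replaces A's single interleaved backward index walk by a forward list pipeline
-- (rstrip the prefix, cut at the last level-0 boundary, zip lines with successors,
-- search the pairs); same cost, different decomposition ("alternative").

-- ===== PORT A =====
-- backward while-loop of A; fuel n+1 means the current index i is n
def citeALoop (lines : List String) (insert_pos : Int) (sp : String) (pl : Option String) (pp : String) : Nat → Bool
  | 0 => false
  | k + 1 =>
    let raw := PySem.Str.rstrip ((PySem.List.pyGet? lines (k : Int)).getD "")
    if PySem.Str.startswith raw "0 " then false
    else if raw = sp ∨ PySem.Str.startswith raw (sp ++ " ") = true then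
      let next_line := if (k : Int) + 1 < insert_pos then PySem.Str.rstrip ((PySem.List.pyGet? lines ((k : Int) + 1)).getD "") else ""
      let has_page := PySem.Str.startswith next_line pp
      if pl = none ∧ has_page = false then true
      else if pl ≠ none ∧ some next_line = pl then true
      else citeALoop lines insert_pos sp pl pp k
    else citeALoop lines insert_pos sp pl pp k

def citation_already_exists_py (lines : List String) (insert_pos : Int) (sour_xref : String) (page : String) (cite_level : Int) : Bool :=
  let sp := PySem.Int.toStr cite_level ++ " SOUR " ++ sour_xref
  let pstr := PySem.Str.strip page
  let pl : Option String := if page ≠ "" ∧ pstr ≠ "" then some (PySem.Int.toStr (cite_level + 1) ++ " PAGE " ++ pstr) else none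
  let pp := PySem.Int.toStr (cite_level + 1) ++ " PAGE "
  citeALoop lines insert_pos sp pl pp insert_pos.toNat

-- ===== PORT B =====
def citation_already_exists_py_alt (lines : List String) (insert_pos : Int) (sour_xref : String) (page : String) (cite_level : Int) : Bool :=
  let sp := PySem.Int.toStr cite_level ++ " SOUR " ++ sour_xref
  let p := if page ≠ "" then PySem.Str.strip page else ""
  let pl : Option String := if p ≠ "" then some (PySem.Int.toStr (cite_level + 1) ++ " PAGE " ++ p) else none
  let pt := PySem.Int.toStr (cite_level + 1) ++ " PAGE "
  let n := max insert_pos 0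
  let block0 := (PySem.List.slice lines none (some n)).map PySem.Str.rstrip
  let cut := (PySem.List.enumerate block0).foldl
      (fun acc jl => if PySem.Str.startswith jl.2 "0 " then jl.1 + 1 else acc) 0
  let block := PySem.List.slice block0 (some cut) none
  let pairs := block.zip (block.drop 1 ++ [""])
  pairs.any (fun rn =>
    (rn.1 == sp || PySem.Str.startswith rn.1 (sp ++ " ")) &&
    (match pl with
     | some q => rn.2 == q
     | none => !PySem.Str.startswith rn.2 pt))

-- ===== PRECONDITION & SPEC =====
-- Pre_ excludes exactly the inputs where Python A raises IndexError: insert_pos beyond the end of lines.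
def Pre_citation_already_exists_py (lines : List String) (insert_pos : Int) (sour_xref : String) (page : String) (cite_level : Int) : Prop :=
  insert_pos ≤ (lines.length : Int)
instance (lines : List String) (insert_pos : Int) (sour_xref : String) (page : String) (cite_level : Int) : Decidable (Pre_citation_already_exists_py lines insert_pos sour_xref page cite_level) := by unfold Pre_citation_already_exists_py; infer_instance

def pvWitness_citation_already_exists_py : List String × Int × String × String × Int :=
  (["0 @I1@ INDI", "1 SOUR @S1@", "2 PAGE p1"], 3, "@S1@", "p1", 1)

def Spec_citation_already_exists_py (lines : List String) (insert_pos : Int) (sour_xref : String) (page : String) (cite_level : Int) (out : Bool) : Prop := out = citation_already_exists_py_alt lines insert_pos sour_xref page cite_level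
instance (lines : List String) (insert_pos : Int) (sour_xref : String) (page : String) (cite_level : Int) (out : Bool) : Decidable (Spec_citation_already_exists_py lines insert_pos sour_xref page cite_level out) := by unfold Spec_citation_already_exists_py; infer_instance

-- ===== CLAIM (what is proved, stated in full; the proofs are below) =====
def Claim_equal_citation_already_exists_py : Prop := ∀ (lines : List String) (insert_pos : Int) (sour_xref : String) (page : String) (cite_level : Int), Dom_citation_already_exists_py lines insert_pos sour_xref page cite_level → Pre_citation_already_exists_py lines insert_pos sour_xref page cite_level → Spec_citation_already_exists_py lines insert_pos sour_xref page cite_level (citation_already_exists_py lines insert_pos sour_xref page cite_level)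

-- ===== LEMMAS AND PROOFS =====

-- the rstripped line at index i (both sides see this value for in-range i)
def citeG (lines : List String) (i : Nat) : String :=
  PySem.Str.rstrip ((PySem.List.pyGet? lines (i : Int)).getD "")

-- the boundary test (level-0 record start) at index j
def citeBnd (lines : List String) (j : Nat) : Bool :=
  PySem.Str.startswith (citeG lines j) "0 "

-- the per-index match condition, shared characterisation of both programs
def citeCond (lines : List String) (insert_pos : Int) (sp : String) (pl : Option String) (pt : String) (i : Nat) : Bool :=
  let raw := citeG lines i
  if raw = sp ∨ PySem.Str.startswith raw (sp ++ " ") = true then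
    let next_line := if (i : Int) + 1 < insert_pos then citeG lines (i + 1) else ""
    match pl with
    | none => !(PySem.Str.startswith next_line pt)
    | some q => next_line == q
  else false

-- proof-only recursive form of B's boundary cut
def citeS (lines : List String) : Nat → Nat
  | 0 => 0
  | k + 1 => if citeBnd lines k then k + 1 else citeS lines k

lemma citeALoop_iff (lines : List String) (insert_pos : Int) (sp : String) (pl : Option String) (pt : String) :
    ∀ n : Nat, citeALoop lines insert_pos sp pl pt n = true ↔
      ∃ i, i < n ∧ citeCond lines insert_pos sp pl pt i = true ∧
        ∀ j, i ≤ j → j < n → citeBnd lines j = false := by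
  intro n
  induction n with
  | zero => simp [citeALoop]
  | succ k ih =>
    have hstep : citeALoop lines insert_pos sp pl pt (k + 1) = true ↔
        citeBnd lines k = false ∧
          (citeCond lines insert_pos sp pl pt k = true ∨ citeALoop lines insert_pos sp pl pt k = true) := by
      simp only [citeALoop]
      unfold citeBnd citeCond citeG
      by_cases hb : PySem.Str.startswith (PySem.Str.rstrip ((PySem.List.pyGet? lines (k : Int)).getD "")) "0 " = true
      · rw [if_pos hb]
        simp_all
      · rw [if_neg hb]
        by_cases hm : (PySem.Str.rstrip ((PySem.List.pyGet? lines (k : Int)).getD "") = sp ∨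
            PySem.Str.startswith (PySem.Str.rstrip ((PySem.List.pyGet? lines (k : Int)).getD "")) (sp ++ " ") = true)
        · rw [if_pos hm]
          cases pl with
          | none =>
            by_cases hp : PySem.Str.startswith (if (k : Int) + 1 < insert_pos then PySem.Str.rstrip ((PySem.List.pyGet? lines ((k : Int) + 1)).getD "") else "") pt = true <;>
              simp_all
          | some p =>
            by_cases hq : (if (k : Int) + 1 < insert_pos then PySem.Str.rstrip ((PySem.List.pyGet? lines ((k : Int) + 1)).getD "") else "") = p <;>
              simp_all [beq_iff_eq]
        · rw [if_neg hm]
          simp_all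
    rw [hstep, ih]
    constructor
    · rintro ⟨hbk, hck | ⟨i, hin, hci, hnb⟩⟩
      · refine ⟨k, by omega, hck, fun j h1 h2 => ?_⟩
        have hj : j = k := by omega
        rw [hj]; exact hbk
      · refine ⟨i, by omega, hci, fun j h1 h2 => ?_⟩
        by_cases hjk : j = k
        · rw [hjk]; exact hbk
        · exact hnb j h1 (by omega)
    · rintro ⟨i, hin, hci, hnb⟩
      have hbk : citeBnd lines k = false := hnb k (by omega) (by omega)
      refine ⟨hbk, ?_⟩
      by_cases hik : i = k
      · exact Or.inl (hik ▸ hci)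
      · exact Or.inr ⟨i, by omega, hci, fun j h1 h2 => hnb j h1 (by omega)⟩

lemma citeS_le (lines : List String) : ∀ n, citeS lines n ≤ n := by
  intro n
  induction n with
  | zero => simp [citeS]
  | succ k ih => rw [citeS]; split <;> omega

lemma citeS_noBnd (lines : List String) :
    ∀ n j, citeS lines n ≤ j → j < n → citeBnd lines j = false := by
  intro n
  induction n with
  | zero => intro j _ h; omega
  | succ k ih =>
    intro j h1 h2
    rw [citeS] at h1
    by_cases hb : citeBnd lines k = true
    · rw [if_pos hb] at h1; omega
    · rw [if_neg hb] at h1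
      simp only [Bool.not_eq_true] at hb
      by_cases hjk : j = k
      · rw [hjk]; exact hb
      · exact ih j h1 (by omega)

lemma citeS_pos (lines : List String) :
    ∀ n, citeS lines n = 0 ∨
      (citeS lines n - 1 < n ∧ citeBnd lines (citeS lines n - 1) = true) := by
  intro n
  induction n with
  | zero => simp [citeS]
  | succ k ih =>
    rw [citeS]
    by_cases hb : citeBnd lines k = true
    · rw [if_pos hb]
      exact Or.inr ⟨by omega, hb⟩
    · rw [if_neg hb]
      rcases ih with h | ⟨h1, h2⟩
      · exact Or.inl h
      · exact Or.inr ⟨by omega, h2⟩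

lemma bool_eq_of_iff {a b : Bool} (h : a = true ↔ b = true) : a = b := by
  cases a <;> cases b <;> simp_all

-- block0's entries are citeG (in range)
lemma block0_getElem? (lines : List String) (m : Nat) (hm : m ≤ lines.length) (i : Nat) (hi : i < m) :
    ((lines.take m).map PySem.Str.rstrip)[i]? = some (citeG lines i) := by
  have hil : i < lines.length := by omega
  rw [List.getElem?_map, List.getElem?_take_of_lt hi, List.getElem?_eq_getElem hil]
  simp [citeG, PySem.List.pyGet?_natCast, List.getElem?_eq_getElem hil]

-- B's enumerate-fold computes the recursive cut
lemma cut_eq (lines : List String) :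
    ∀ m : Nat, m ≤ lines.length →
      ((PySem.List.enumerate ((lines.take m).map PySem.Str.rstrip)).foldl
        (fun acc jl => if PySem.Str.startswith jl.2 "0 " then jl.1 + 1 else acc) 0)
      = (citeS lines m : Int) := by
  intro m
  induction m with
  | zero => intro _; simp [citeS]
  | succ k ih =>
    intro hm
    have hk : k < lines.length := by omega
    have htake : lines.take (k + 1) = lines.take k ++ [lines[k]] := by
      rw [List.take_add_one, List.getElem?_eq_getElem hk]; rfl
    have hlen : ((lines.take k).map PySem.Str.rstrip).length = k := by
      simp [List.length_take, Nat.min_eq_left (by omega : k ≤ lines.length)]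
    have hg : PySem.Str.rstrip lines[k] = citeG lines k := by
      simp [citeG, PySem.List.pyGet?_natCast, List.getElem?_eq_getElem hk]
    rw [htake, List.map_append, PySem.List.enumerate_append, List.foldl_append, ih (by omega),
      List.map_cons, List.map_nil, PySem.List.enumerate_cons, PySem.List.enumerate_nil,
      List.foldl_cons, List.foldl_nil, hlen, hg, citeS]
    have hb' : PySem.Str.startswith (citeG lines k) "0 " = citeBnd lines k := rfl
    rw [hb']
    by_cases hb : citeBnd lines k = true
    · rw [if_pos hb, if_pos hb]
      omega
    · rw [if_neg hb, if_neg hb]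

-- the pair at position k of B's zip, as citeG values
lemma zip_any_iff (lines : List String) (m c : Nat) (hm : m ≤ lines.length) (hc : c ≤ m)
    (pred : String × String → Bool) :
    ((((lines.take m).map PySem.Str.rstrip).drop c).zip
        ((((lines.take m).map PySem.Str.rstrip).drop c).drop 1 ++ [""])).any pred = true ↔
      ∃ i, c ≤ i ∧ i < m ∧
        pred (citeG lines i, if i + 1 < m then citeG lines (i + 1) else "") = true := by
  set B0 := (lines.take m).map PySem.Str.rstrip with hB0
  have hlen : B0.length = m := by
    simp [hB0, List.length_take, Nat.min_eq_left hm]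
  set bl := B0.drop c with hbl
  have hbllen : bl.length = m - c := by simp [hbl, hlen]
  have hpairlen : (bl.zip (bl.drop 1 ++ [""])).length = m - c := by
    simp only [List.length_zip, List.length_append, List.length_drop, hbllen, List.length_cons,
      List.length_nil]
    omega
  have hget : ∀ k (hk : k < m - c),
      (bl.zip (bl.drop 1 ++ [""]))[k]'(by omega) =
        (citeG lines (c + k), if c + k + 1 < m then citeG lines (c + k + 1) else "") := by
    intro k hk
    have h1 : bl[k]'(by omega) = citeG lines (c + k) := by
      have hsome : bl[k]? = some (citeG lines (c + k)) := by
        rw [hbl, List.getElem?_drop, block0_getElem? lines m hm (c + k) (by omega)]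
      rw [List.getElem?_eq_getElem (by omega : k < bl.length)] at hsome
      exact Option.some.inj hsome
    have hlt2 : k < (bl.drop 1 ++ [""]).length := by
      rw [List.length_append, List.length_drop, hbllen]
      simp; omega
    have h2 : (bl.drop 1 ++ [""])[k]'hlt2 =
        (if c + k + 1 < m then citeG lines (c + k + 1) else "") := by
      by_cases hlast : k < m - c - 1
      · have hsome : (bl.drop 1 ++ [""])[k]? = some (citeG lines (c + k + 1)) := by
          rw [List.getElem?_append_left (by rw [List.length_drop, hbllen]; omega),
            List.getElem?_drop, hbl, List.getElem?_drop]
          have hidx : c + (1 + k) = c + k + 1 := by omega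
          rw [hidx, block0_getElem? lines m hm (c + k + 1) (by omega)]
        rw [List.getElem?_eq_getElem hlt2] at hsome
        rw [if_pos (by omega), Option.some.inj hsome]
      · have hkeq : k = m - c - 1 := by omega
        have hsome : (bl.drop 1 ++ [""])[k]? = some "" := by
          rw [List.getElem?_append_right (by rw [List.length_drop, hbllen]; omega)]
          rw [List.length_drop, hbllen]
          simp [hkeq]
        rw [List.getElem?_eq_getElem hlt2] at hsome
        rw [if_neg (by omega), Option.some.inj hsome]
    rw [List.getElem_zip]
    rw [Prod.ext_iff]
    exact ⟨h1, h2⟩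
  rw [List.any_eq_true]
  constructor
  · rintro ⟨x, hx, hpx⟩
    obtain ⟨k, hk, hxk⟩ := List.mem_iff_getElem.1 hx
    have hk' : k < m - c := by omega
    refine ⟨c + k, by omega, by omega, ?_⟩
    rw [← hget k hk', hxk]; exact hpx
  · rintro ⟨i, hci, him, hpi⟩
    refine ⟨(citeG lines i, if i + 1 < m then citeG lines (i + 1) else ""), ?_, hpi⟩
    have hk' : i - c < m - c := by omega
    have := hget (i - c) hk'
    rw [List.mem_iff_getElem]
    refine ⟨i - c, by omega, ?_⟩
    rw [this]
    have h1 : c + (i - c) = i := by omega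
    rw [h1]
  
-- B's pair predicate agrees with citeCond on in-range indices (insert_pos = m case)
lemma pred_eq_cond (lines : List String) (insert_pos : Int) (sp : String) (pl : Option String) (pt : String)
    (m : Nat) (hm : insert_pos = (m : Int)) (i : Nat) (him : i < m) :
    ((citeG lines i == sp || PySem.Str.startswith (citeG lines i) (sp ++ " ")) &&
      (match pl with
       | some q => (if i + 1 < m then citeG lines (i + 1) else "") == q
       | none => !PySem.Str.startswith (if i + 1 < m then citeG lines (i + 1) else "") pt))
      = citeCond lines insert_pos sp pl pt i := by
  unfold citeCond
  have hif : (if (i : Int) + 1 < insert_pos then citeG lines (i + 1) else "")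
      = (if i + 1 < m then citeG lines (i + 1) else "") := by
    by_cases h : i + 1 < m
    · rw [if_pos (show (i : Int) + 1 < insert_pos by rw [hm]; exact_mod_cast h), if_pos h]
    · rw [if_neg (show ¬ ((i : Int) + 1 < insert_pos) by rw [hm]; push_cast; omega), if_neg h]
  rw [hif]
  by_cases hr : (citeG lines i = sp ∨ PySem.Str.startswith (citeG lines i) (sp ++ " ") = true)
  · rw [if_pos hr]
    have hb1 : (citeG lines i == sp || PySem.Str.startswith (citeG lines i) (sp ++ " ")) = true := by
      rcases hr with h | h
      · rw [h]; simp only [beq_self_eq_true, Bool.true_or]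
      · rw [h]; simp only [Bool.or_true]
    rw [hb1, Bool.true_and]
    cases pl <;> rfl
  · rw [if_neg hr]
    push_neg at hr
    have hb1 : (citeG lines i == sp) = false := by
      simp only [beq_eq_false_iff_ne, ne_eq]; exact hr.1
    have hb2 : PySem.Str.startswith (citeG lines i) (sp ++ " ") = false := by
      have := hr.2
      revert this
      cases PySem.Str.startswith (citeG lines i) (sp ++ " ") <;> simp
    rw [hb1, hb2, Bool.or_self, Bool.false_and]

-- the two programs compute the same page_line option
lemma pl_eq (page : String) (s : String) :
    (if page ≠ "" ∧ PySem.Str.strip page ≠ "" then some (s ++ PySem.Str.strip page) else none)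
      = (if (if page ≠ "" then PySem.Str.strip page else "") ≠ ""
          then some (s ++ (if page ≠ "" then PySem.Str.strip page else "")) else none) := by
  by_cases h1 : page = ""
  · simp [h1]
  · simp only [h1, if_neg, ne_eq, not_false_iff, if_true]
    by_cases h2 : PySem.Str.strip page = "" <;> simp [h1, h2]

-- ===== VERDICT (by name: the statement is the Claim_ definition above) =====
theorem citation_already_exists_py_spec : Claim_equal_citation_already_exists_py := by
  intro lines insert_pos sour_xref page cite_level _ hpre
  unfold Spec_citation_already_exists_py
  unfold Pre_citation_already_exists_py at hpre
  simp only [citation_already_exists_py, citation_already_exists_py_alt]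
  set sp := PySem.Int.toStr cite_level ++ " SOUR " ++ sour_xref with hsp
  set pt := PySem.Int.toStr (cite_level + 1) ++ " PAGE " with hpt
  set m := insert_pos.toNat with hm
  have hmle : m ≤ lines.length := by omega
  have hmax : max insert_pos 0 = (m : Int) := by omega
  have hplEq := pl_eq page (PySem.Int.toStr (cite_level + 1) ++ " PAGE ")
  rw [← hplEq, hmax, PySem.List.slice_to_natCast]
  set pl := (if page ≠ "" ∧ PySem.Str.strip page ≠ "" then
      some (PySem.Int.toStr (cite_level + 1) ++ " PAGE " ++ PySem.Str.strip page) else none) with hpl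
  rw [cut_eq lines m hmle]
  rw [PySem.List.slice_from_natCast]
  apply bool_eq_of_iff
  rw [citeALoop_iff lines insert_pos sp pl pt m,
    zip_any_iff lines m (citeS lines m) hmle (citeS_le lines m)]
  constructor
  · rintro ⟨i, him, hci, hnb⟩
    have hip : insert_pos = (m : Int) := by omega
    have hsi : citeS lines m ≤ i := by
      rcases citeS_pos lines m with h | ⟨h1, h2⟩
      · omega
      · by_contra hlt
        have hf : citeBnd lines (citeS lines m - 1) = false := hnb _ (by omega) (by omega)
        rw [hf] at h2; cases h2
    exact ⟨i, hsi, him, by rw [pred_eq_cond lines insert_pos sp pl pt m hip i him]; exact hci⟩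
  · rintro ⟨i, hci, him, hp⟩
    have hip : insert_pos = (m : Int) := by omega
    rw [pred_eq_cond lines insert_pos sp pl pt m hip i him] at hp
    exact ⟨i, him, hp, fun j h1 h2 => citeS_noBnd lines m j (by omega) h2⟩
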